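-- pv_equiv track=rewrite | github.com/rmazanek/WordleSolver | RemainingWords.py | GetRemainingGuesses
-- ===== SOURCE A (Python) =====
-- def GetRemainingGuesses(letters):
--   guesses = []
--   for i in range(0, len(letters[0])):
--     for j in range(0, len(letters[1])):
--       for k in range(0, len(letters[2])):
--         for l in range(0, len(letters[3])):
--           for m in range(0, len(letters[4])):
--             newGuess = letters[0][i]+letters[1][j]+letters[2][k]+letters[3][l]+letters[4][m]
--             guesses.append(newGuess)
--   return guesses
-- ===== SOURCE B (Python) =====
-- def GetRemainingGuesses(letters):
--     result = [c for c in letters[0]]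
--     for pos in (1, 2, 3, 4):
--         result = [p + c for p in result for c in letters[pos]]
--     return result
-- ===== Notes on version B (the rewrite author's own statement) =====
-- stated objective: simpler
-- what changed: Replaces A's five hard-coded nested index loops (range(len(...)) with explicit indexing) by a single prefix-product accumulator that is rebuilt once per position via a comprehension, in the same output order.
import Mathlib
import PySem

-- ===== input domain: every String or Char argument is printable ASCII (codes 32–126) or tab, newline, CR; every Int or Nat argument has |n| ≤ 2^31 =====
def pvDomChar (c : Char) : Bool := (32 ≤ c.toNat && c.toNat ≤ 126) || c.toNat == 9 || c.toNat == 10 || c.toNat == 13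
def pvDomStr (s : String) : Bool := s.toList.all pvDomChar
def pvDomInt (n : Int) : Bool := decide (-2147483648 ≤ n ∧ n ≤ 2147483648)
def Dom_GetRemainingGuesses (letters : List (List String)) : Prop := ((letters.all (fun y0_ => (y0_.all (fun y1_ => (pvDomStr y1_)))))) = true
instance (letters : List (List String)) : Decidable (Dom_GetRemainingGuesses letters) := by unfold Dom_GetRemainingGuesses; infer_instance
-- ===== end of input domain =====

-- B replaces A's five hard-coded nested index loops by a left-to-right prefix-product
-- accumulator rebuilt per position (simpler decomposition, same return value and order).

-- ===== PORT A =====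
def GetRemainingGuesses (letters : List (List String)) : List String :=
  let l0 := PySem.List.pyGetD letters 0 []
  let l1 := PySem.List.pyGetD letters 1 []
  let l2 := PySem.List.pyGetD letters 2 []
  let l3 := PySem.List.pyGetD letters 3 []
  let l4 := PySem.List.pyGetD letters 4 []
  (PySem.List.pyRange 0 l0.length 1).foldl (fun g i =>
    (PySem.List.pyRange 0 l1.length 1).foldl (fun g j =>
      (PySem.List.pyRange 0 l2.length 1).foldl (fun g k =>
        (PySem.List.pyRange 0 l3.length 1).foldl (fun g l =>
          (PySem.List.pyRange 0 l4.length 1).foldl (fun g m =>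
            g ++ [(((PySem.List.pyGetD l0 i "" ++ PySem.List.pyGetD l1 j "") ++
                  PySem.List.pyGetD l2 k "") ++ PySem.List.pyGetD l3 l "") ++
                  PySem.List.pyGetD l4 m ""]) g) g) g) g) []

-- ===== PORT B =====
def GetRemainingGuesses_alt (letters : List (List String)) : List String :=
  let result := (PySem.List.pyGetD letters 0 []).map (fun c => c)
  [(1 : Int), 2, 3, 4].foldl (fun result pos =>
    result.flatMap (fun p => (PySem.List.pyGetD letters pos []).map (fun c => p ++ c))) result

-- ===== PRECONDITION & SPEC =====
-- Pre_ excludes exactly the inputs on which the Python A raises IndexError (fewer than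
-- five sublists, none of the existing ones empty); B raises there identically.
def Pre_GetRemainingGuesses (letters : List (List String)) : Prop :=
  5 ≤ letters.length ∨ [] ∈ letters
instance (letters : List (List String)) : Decidable (Pre_GetRemainingGuesses letters) := by
  unfold Pre_GetRemainingGuesses; infer_instance

def pvWitness_GetRemainingGuesses : List (List String) :=
  [["a"], ["b"], ["c"], ["d"], ["e"]]

def Spec_GetRemainingGuesses (letters : List (List String)) (out : List String) : Prop := out = GetRemainingGuesses_alt letters
instance (letters : List (List String)) (out : List String) : Decidable (Spec_GetRemainingGuesses letters out) := by unfold Spec_GetRemainingGuesses; infer_instance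

-- ===== CLAIM (what is proved, stated in full; the proofs are below) =====
def Claim_equal_GetRemainingGuesses : Prop := ∀ (letters : List (List String)), Dom_GetRemainingGuesses letters → Pre_GetRemainingGuesses letters → Spec_GetRemainingGuesses letters (GetRemainingGuesses letters)

-- ===== LEMMAS AND PROOFS =====

theorem flatMap_single {α β : Type} (f : α → β) (l : List α) :
    l.flatMap (fun x => [f x]) = l.map f := by
  induction l with
  | nil => rfl
  | cons x xs ih => simp [List.flatMap_cons, ih]

-- one index loop over `range(len(xs))` that appends `g x` per element = `g ++ xs.flatMap`
theorem idx_loop_eq {α : Type} (xs : List α) (d : α) (h : α → List String) (g : List String) :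
    (PySem.List.pyRange 0 xs.length 1).foldl
      (fun g i => g ++ h (PySem.List.pyGetD xs i d)) g = g ++ xs.flatMap h := by
  have h1 := PySem.List.foldl_pyRange_zero_pyGetD' xs d (fun g x => g ++ h x) g
  exact h1.trans (PySem.List.foldl_append_eq_flatMap h xs g)

theorem core (l0 l1 l2 l3 l4 : List String) :
    (PySem.List.pyRange 0 l0.length 1).foldl (fun g i =>
      (PySem.List.pyRange 0 l1.length 1).foldl (fun g j =>
        (PySem.List.pyRange 0 l2.length 1).foldl (fun g k =>
          (PySem.List.pyRange 0 l3.length 1).foldl (fun g l =>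
            (PySem.List.pyRange 0 l4.length 1).foldl (fun g m =>
              g ++ [(((PySem.List.pyGetD l0 i "" ++ PySem.List.pyGetD l1 j "") ++
                    PySem.List.pyGetD l2 k "") ++ PySem.List.pyGetD l3 l "") ++
                    PySem.List.pyGetD l4 m ""]) g) g) g) g) []
    = ((((l0.map (fun c => c)).flatMap (fun p => l1.map (fun c => p ++ c))).flatMap
          (fun p => l2.map (fun c => p ++ c))).flatMap
          (fun p => l3.map (fun c => p ++ c))).flatMap (fun p => l4.map (fun c => p ++ c)) := by
  have h4 : ∀ (s : String) (g : List String),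
      (PySem.List.pyRange 0 l4.length 1).foldl
        (fun g m => g ++ [s ++ PySem.List.pyGetD l4 m ""]) g
      = g ++ l4.flatMap (fun e => [s ++ e]) := fun s g =>
    idx_loop_eq l4 "" (fun e => [s ++ e]) g
  have h3 : ∀ (s : String) (g : List String),
      (PySem.List.pyRange 0 l3.length 1).foldl (fun g l =>
        (PySem.List.pyRange 0 l4.length 1).foldl
          (fun g m => g ++ [(s ++ PySem.List.pyGetD l3 l "") ++ PySem.List.pyGetD l4 m ""]) g) g
      = g ++ l3.flatMap (fun d => l4.flatMap (fun e => [(s ++ d) ++ e])) := by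
    intro s g
    calc (PySem.List.pyRange 0 l3.length 1).foldl (fun g l =>
        (PySem.List.pyRange 0 l4.length 1).foldl
          (fun g m => g ++ [(s ++ PySem.List.pyGetD l3 l "") ++ PySem.List.pyGetD l4 m ""]) g) g
        = (PySem.List.pyRange 0 l3.length 1).foldl (fun g l =>
            g ++ l4.flatMap (fun e => [(s ++ PySem.List.pyGetD l3 l "") ++ e])) g := by
          refine PySem.List.foldl_congr_mem _ _ _ _ ?_
          intro g' l _
          exact h4 (s ++ PySem.List.pyGetD l3 l "") g'
      _ = g ++ l3.flatMap (fun d => l4.flatMap (fun e => [(s ++ d) ++ e])) :=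
          idx_loop_eq l3 "" (fun d => l4.flatMap (fun e => [(s ++ d) ++ e])) g
  have h2 : ∀ (s : String) (g : List String),
      (PySem.List.pyRange 0 l2.length 1).foldl (fun g k =>
        (PySem.List.pyRange 0 l3.length 1).foldl (fun g l =>
          (PySem.List.pyRange 0 l4.length 1).foldl
            (fun g m => g ++ [((s ++ PySem.List.pyGetD l2 k "") ++ PySem.List.pyGetD l3 l "") ++
              PySem.List.pyGetD l4 m ""]) g) g) g
      = g ++ l2.flatMap (fun c => l3.flatMap (fun d => l4.flatMap (fun e => [((s ++ c) ++ d) ++ e]))) := by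
    intro s g
    calc _ = (PySem.List.pyRange 0 l2.length 1).foldl (fun g k =>
            g ++ l3.flatMap (fun d => l4.flatMap (fun e => [((s ++ PySem.List.pyGetD l2 k "") ++ d) ++ e]))) g := by
          refine PySem.List.foldl_congr_mem _ _ _ _ ?_
          intro g' k _
          exact h3 (s ++ PySem.List.pyGetD l2 k "") g'
      _ = _ := idx_loop_eq l2 ""
            (fun c => l3.flatMap (fun d => l4.flatMap (fun e => [((s ++ c) ++ d) ++ e]))) g
  have h1 : ∀ (s : String) (g : List String),
      (PySem.List.pyRange 0 l1.length 1).foldl (fun g j =>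
        (PySem.List.pyRange 0 l2.length 1).foldl (fun g k =>
          (PySem.List.pyRange 0 l3.length 1).foldl (fun g l =>
            (PySem.List.pyRange 0 l4.length 1).foldl
              (fun g m => g ++ [(((s ++ PySem.List.pyGetD l1 j "") ++ PySem.List.pyGetD l2 k "") ++
                PySem.List.pyGetD l3 l "") ++ PySem.List.pyGetD l4 m ""]) g) g) g) g
      = g ++ l1.flatMap (fun b => l2.flatMap (fun c => l3.flatMap (fun d =>
          l4.flatMap (fun e => [(((s ++ b) ++ c) ++ d) ++ e])))) := by
    intro s g
    calc _ = (PySem.List.pyRange 0 l1.length 1).foldl (fun g j =>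
            g ++ l2.flatMap (fun c => l3.flatMap (fun d => l4.flatMap
              (fun e => [(((s ++ PySem.List.pyGetD l1 j "") ++ c) ++ d) ++ e])))) g := by
          refine PySem.List.foldl_congr_mem _ _ _ _ ?_
          intro g' j _
          exact h2 (s ++ PySem.List.pyGetD l1 j "") g'
      _ = _ := idx_loop_eq l1 ""
            (fun b => l2.flatMap (fun c => l3.flatMap (fun d =>
              l4.flatMap (fun e => [(((s ++ b) ++ c) ++ d) ++ e])))) g
  have h0 :
      (PySem.List.pyRange 0 l0.length 1).foldl (fun g i =>
        (PySem.List.pyRange 0 l1.length 1).foldl (fun g j =>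
          (PySem.List.pyRange 0 l2.length 1).foldl (fun g k =>
            (PySem.List.pyRange 0 l3.length 1).foldl (fun g l =>
              (PySem.List.pyRange 0 l4.length 1).foldl (fun g m =>
                g ++ [(((PySem.List.pyGetD l0 i "" ++ PySem.List.pyGetD l1 j "") ++
                      PySem.List.pyGetD l2 k "") ++ PySem.List.pyGetD l3 l "") ++
                      PySem.List.pyGetD l4 m ""]) g) g) g) g) []
      = [] ++ l0.flatMap (fun a => l1.flatMap (fun b => l2.flatMap (fun c => l3.flatMap (fun d =>
          l4.flatMap (fun e => [(((a ++ b) ++ c) ++ d) ++ e]))))) := by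
    calc _ = (PySem.List.pyRange 0 l0.length 1).foldl (fun g i =>
            g ++ l1.flatMap (fun b => l2.flatMap (fun c => l3.flatMap (fun d =>
              l4.flatMap (fun e => [(((PySem.List.pyGetD l0 i "" ++ b) ++ c) ++ d) ++ e]))))) [] := by
          refine PySem.List.foldl_congr_mem _ _ _ _ ?_
          intro g' i _
          exact h1 (PySem.List.pyGetD l0 i "") g'
      _ = _ := idx_loop_eq l0 ""
            (fun a => l1.flatMap (fun b => l2.flatMap (fun c => l3.flatMap (fun d =>
              l4.flatMap (fun e => [(((a ++ b) ++ c) ++ d) ++ e]))))) []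
  rw [h0]
  simp [List.flatMap_assoc, List.flatMap_map, flatMap_single]

theorem ports_agree (letters : List (List String)) :
    GetRemainingGuesses letters = GetRemainingGuesses_alt letters := by
  unfold GetRemainingGuesses GetRemainingGuesses_alt
  simp only [List.foldl_cons, List.foldl_nil]
  exact core (PySem.List.pyGetD letters 0 []) (PySem.List.pyGetD letters 1 [])
    (PySem.List.pyGetD letters 2 []) (PySem.List.pyGetD letters 3 [])
    (PySem.List.pyGetD letters 4 [])

-- ===== VERDICT (by name: the statement is the Claim_ definition above) =====
theorem GetRemainingGuesses_spec : Claim_equal_GetRemainingGuesses := by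
  intro letters _ _
  exact ports_agree letters
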